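-- pv_equiv track=rewrite | github.com/Baguette-bbang/coding-test | BaekJoon/10000/14501.py | consulting_plan
-- ===== SOURCE A (Python) =====
-- def consulting_plan(n,idx,total_p, consulting):
--     # 재귀 종료조건
--     if idx>=n:
--         return total_p
--     # 퇴사일 안에 상담이 끝나야함
--     if idx + consulting[idx][0] <= n:
--         p_with_consulting = consulting_plan(n,idx+consulting[idx][0], total_p+consulting[idx][1], consulting)
--     else :
--         p_with_consulting = total_p
--     p_without_consulting = consulting_plan(n,idx+1, total_p, consulting)
--
--     return max(p_with_consulting, p_without_consulting)
-- ===== SOURCE B (Python) =====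
-- def consulting_plan(n, idx, total_p, consulting):
--     # Bottom-up DP: dp[j] = best extra profit obtainable from day (current i) + j onward.
--     if idx >= n:
--         return total_p
--     dp = [0]
--     for i in reversed(range(idx, n)):
--         t = consulting[i][0]
--         if i + t <= n:
--             best = max(dp[0], consulting[i][1] + dp[t - 1])
--         else:
--             best = dp[0]
--         dp = [best] + dp
--     return total_p + dp[0]
-- ===== Notes on version B (the rewrite author's own statement) =====
-- stated objective: faster
-- what changed: A explores both take/skip branches by exponential recursion; B computes the answer with a bottom-up dynamic program, building a list of best-future-profits back-to-front in one pass over the days.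
-- outside the precondition, e.g. on consulting_plan(1, -1, 0, [[1, 3]]): A returns 6, B returns 6
import Mathlib
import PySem

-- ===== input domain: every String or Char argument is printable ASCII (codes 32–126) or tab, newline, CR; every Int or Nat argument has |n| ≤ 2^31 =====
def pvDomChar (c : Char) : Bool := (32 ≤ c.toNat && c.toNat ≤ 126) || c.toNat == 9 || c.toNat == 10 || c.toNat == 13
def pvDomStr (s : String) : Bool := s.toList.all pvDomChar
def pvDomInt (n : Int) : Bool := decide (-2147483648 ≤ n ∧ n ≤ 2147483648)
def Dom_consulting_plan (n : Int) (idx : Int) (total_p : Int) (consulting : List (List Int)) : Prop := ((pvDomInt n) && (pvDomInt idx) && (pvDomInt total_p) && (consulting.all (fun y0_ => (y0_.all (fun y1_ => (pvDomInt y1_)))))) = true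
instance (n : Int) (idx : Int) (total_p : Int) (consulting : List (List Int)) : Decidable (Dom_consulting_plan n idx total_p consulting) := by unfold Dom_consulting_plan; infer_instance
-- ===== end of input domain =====

-- B replaces A's exponential branching recursion by a bottom-up DP list built back-to-front (asymptotically faster).

-- shared indexing abbreviations for the Python expressions consulting[i], consulting[i][0], consulting[i][1]
def rowOf (consulting : List (List Int)) (i : Int) : List Int := (PySem.List.pyGet? consulting i).getD []
def tOf (consulting : List (List Int)) (i : Int) : Int := (PySem.List.pyGet? (rowOf consulting i) 0).getD 0
def pOf (consulting : List (List Int)) (i : Int) : Int := (PySem.List.pyGet? (rowOf consulting i) 1).getD 0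

-- ===== PORT A =====
-- A's recursion, made total with a fuel argument; under Pre_ every call has fuel ≥ (n-idx)+1,
-- so the fuel-exhausted branch is unreachable and each step is exactly A's body.
def consultA : Nat → Int → Int → Int → List (List Int) → Int
  | 0, _, _, total_p, _ => total_p
  | (f+1), n, idx, total_p, consulting =>
    if idx ≥ n then total_p
    else
      let p_with : Int :=
        if idx + tOf consulting idx ≤ n then
          consultA f n (idx + tOf consulting idx) (total_p + pOf consulting idx) consulting
        else total_p
      let p_without := consultA f n (idx + 1) total_p consulting
      max p_with p_without

def consulting_plan (n : Int) (idx : Int) (total_p : Int) (consulting : List (List Int)) : Int :=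
  consultA ((n - idx).toNat + 1) n idx total_p consulting

-- ===== PORT B =====
-- one loop step of Source B: prepend the best profit from day i to the dp list covering days i+1..n
def stepB (n : Int) (consulting : List (List Int)) (dp : List Int) (i : Int) : List Int :=
  let best : Int :=
    if i + tOf consulting i ≤ n then
      max ((PySem.List.pyGet? dp 0).getD 0)
          (pOf consulting i + (PySem.List.pyGet? dp (tOf consulting i - 1)).getD 0)
    else (PySem.List.pyGet? dp 0).getD 0
  best :: dp

def consulting_plan_alt (n : Int) (idx : Int) (total_p : Int) (consulting : List (List Int)) : Int :=
  if idx ≥ n then total_p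
  else
    let dp := ((PySem.List.pyRange idx n 1).reverse).foldl (stepB n consulting) [0]
    total_p + (PySem.List.pyGet? dp 0).getD 0

-- ===== PRECONDITION & SPEC =====
-- Pre_ excludes inputs where A raises (missing/short rows → IndexError, a reachable duration ≤ 0 →
-- RecursionError) and negative idx with idx < n, outside the natural domain (idx is a day index),
-- where A's reads rely on Python's negative-index wraparound.
def Pre_consulting_plan (n : Int) (idx : Int) (total_p : Int) (consulting : List (List Int)) : Prop :=
  n ≤ idx ∨ (0 ≤ idx ∧ n ≤ (consulting.length : Int) ∧
    ∀ r ∈ List.range consulting.length, idx ≤ (r : Int) → (r : Int) < n →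
      1 ≤ (consulting.getD r []).length ∧
      1 ≤ (consulting.getD r []).getD 0 0 ∧
      ((r : Int) + (consulting.getD r []).getD 0 0 ≤ n → 2 ≤ (consulting.getD r []).length))
instance (n : Int) (idx : Int) (total_p : Int) (consulting : List (List Int)) : Decidable (Pre_consulting_plan n idx total_p consulting) := by unfold Pre_consulting_plan; infer_instance

def pvWitness_consulting_plan : Int × Int × Int × List (List Int) := (2, 0, 0, [[1, 3], [2, 5]])

def Spec_consulting_plan (n : Int) (idx : Int) (total_p : Int) (consulting : List (List Int)) (out : Int) : Prop := out = consulting_plan_alt n idx total_p consulting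
instance (n : Int) (idx : Int) (total_p : Int) (consulting : List (List Int)) (out : Int) : Decidable (Spec_consulting_plan n idx total_p consulting out) := by unfold Spec_consulting_plan; infer_instance

-- ===== CLAIM (what is proved, stated in full; the proofs are below) =====
def Claim_equal_consulting_plan : Prop := ∀ (n : Int) (idx : Int) (total_p : Int) (consulting : List (List Int)), Dom_consulting_plan n idx total_p consulting → Pre_consulting_plan n idx total_p consulting → Spec_consulting_plan n idx total_p consulting (consulting_plan n idx total_p consulting)

-- ===== LEMMAS AND PROOFS =====

-- the best extra profit obtainable from day i, via A's recursion with sufficient fuel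
def bestA (n : Int) (consulting : List (List Int)) (i : Int) : Int :=
  consultA ((n - i).toNat + 1) n i 0 consulting

-- accumulator shift: A's recursion only adds total_p to the fuel-independent part
theorem consultA_shift (f : Nat) : ∀ (n idx total_p : Int) (C : List (List Int)),
    consultA f n idx total_p C = total_p + consultA f n idx 0 C := by
  induction f with
  | zero => intro n idx tp C; simp [consultA]
  | succ f ih =>
    intro n idx tp C
    by_cases h : idx ≥ n
    · simp [consultA, h]
    · by_cases hw : idx + tOf C idx ≤ n
      · simp only [consultA, h, if_false, hw, if_true]
        rw [ih n (idx + tOf C idx) (tp + pOf C idx) C, ih n (idx + 1) tp C,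
            ih n (idx + tOf C idx) (0 + pOf C idx) C, ih n (idx + 1) 0 C]
        simp only [zero_add]
        rw [add_assoc, max_add_add_left]
      · simp only [consultA, h, if_false, hw]
        rw [ih n (idx + 1) tp C, ih n (idx + 1) 0 C]
        simp only [zero_add]
        rcases le_total (0 : Int) (consultA f n (idx + 1) 0 C) with hY | hY
        · rw [max_eq_right (le_add_of_nonneg_right hY), max_eq_right hY]
        · rw [max_eq_left (add_le_of_nonpos_right hY), max_eq_left hY, add_zero]

theorem consultA_nonneg (f : Nat) : ∀ (n idx : Int) (C : List (List Int)),
    0 ≤ consultA f n idx 0 C := by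
  induction f with
  | zero => intro n idx C; simp [consultA]
  | succ f ih =>
    intro n idx C
    simp only [consultA]
    by_cases h : idx ≥ n
    · simp [h]
    · simp only [h, if_false]
      exact le_trans (ih n (idx + 1) C) (le_max_right _ _)

-- Pre_'s row conditions, in the form the recursion needs
theorem good_of_pre {n idx : Int} {C : List (List Int)}
    (h0 : 0 ≤ idx) (hlen : n ≤ (C.length : Int))
    (hrows : ∀ r ∈ List.range C.length, idx ≤ (r : Int) → (r : Int) < n →
      1 ≤ (C.getD r []).length ∧ 1 ≤ (C.getD r []).getD 0 0 ∧
      ((r : Int) + (C.getD r []).getD 0 0 ≤ n → 2 ≤ (C.getD r []).length))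
    {i : Int} (h1 : idx ≤ i) (h2 : i < n) :
    1 ≤ tOf C i ∧ (i + tOf C i ≤ n → 2 ≤ (rowOf C i).length) := by
  have hi0 : 0 ≤ i := le_trans h0 h1
  have hilt : i.toNat < C.length := by omega
  have hic : (i.toNat : Int) = i := Int.toNat_of_nonneg hi0
  have hr := hrows i.toNat (List.mem_range.mpr hilt) (by omega) (by omega)
  have hrow : rowOf C i = C[i.toNat] := by
    simp [rowOf, PySem.List.pyGet?_of_nonneg C hi0, List.getElem?_eq_getElem hilt]
  have hgetD : C.getD i.toNat [] = C[i.toNat] := List.getD_eq_getElem C [] hilt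
  rw [hgetD, hic] at hr
  have hlen1 : 1 ≤ C[i.toNat].length := hr.1
  have ht : tOf C i = C[i.toNat].getD 0 0 := by
    have h0lt : 0 < C[i.toNat].length := hlen1
    simp [tOf, hrow, PySem.List.pyGet?_zero, List.getElem?_eq_getElem h0lt]
  constructor
  · rw [ht]; exact hr.2.1
  · intro hb; rw [hrow]; exact hr.2.2 (by rw [← ht]; exact hb)

-- one-step unfolding of the recursion below the base case
theorem consultA_succ (f : Nat) (n idx total_p : Int) (C : List (List Int)) (h : ¬ n ≤ idx) :
    consultA (f + 1) n idx total_p C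
      = max (if idx + tOf C idx ≤ n
             then consultA f n (idx + tOf C idx) (total_p + pOf C idx) C
             else total_p)
            (consultA f n (idx + 1) total_p C) := by
  simp only [consultA, ge_iff_le, h, if_false]

-- fuel irrelevance: with enough fuel A's recursion is a function of the index only
theorem consultA_stable {n idx : Int} {C : List (List Int)}
    (hgood : ∀ i : Int, idx ≤ i → i < n → 1 ≤ tOf C i) :
    ∀ (f : Nat), ∀ (g : Nat) (i : Int), idx ≤ i → (n - i).toNat + 1 ≤ f → (n - i).toNat + 1 ≤ g →
      consultA f n i 0 C = consultA g n i 0 C := by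
  intro f
  induction f with
  | zero => intro g i _ hf _; omega
  | succ f ih =>
    intro g i hi hf hg
    obtain ⟨g', rfl⟩ : ∃ g', g = g' + 1 := ⟨g - 1, by omega⟩
    simp only [consultA]
    by_cases h : i ≥ n
    · simp [h]
    · simp only [h, if_false]
      have ht := hgood i hi (by omega)
      by_cases hw : i + tOf C i ≤ n
      · simp only [hw, if_true]
        rw [consultA_shift f n (i + tOf C i) (0 + pOf C i) C,
            consultA_shift g' n (i + tOf C i) (0 + pOf C i) C,
            ih g' (i + tOf C i) (by omega) (by omega) (by omega),
            ih g' (i + 1) (by omega) (by omega) (by omega)]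
      · simp only [hw, if_false]
        rw [ih g' (i + 1) (by omega) (by omega) (by omega)]

-- the DP list built by Source B's loop is exactly [bestA i, bestA (i+1), ..., bestA n]
theorem foldB_eq {n idx : Int} {C : List (List Int)}
    (hgood : ∀ i : Int, idx ≤ i → i < n →
      1 ≤ tOf C i ∧ (i + tOf C i ≤ n → 2 ≤ (rowOf C i).length)) :
    ∀ (m : Nat) (i : Int), idx ≤ i → i ≤ n → (n - i).toNat = m →
      ((PySem.List.pyRange i n 1).reverse).foldl (stepB n C) [0]
        = (List.range (m + 1)).map (fun (j : Nat) => bestA n C (i + (j : Int))) := by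
  intro m
  induction m with
  | zero =>
    intro i _ hle hm
    have hin : i = n := by omega
    subst hin
    rw [show PySem.List.pyRange i i 1 = [] by
      rw [PySem.List.pyRange_one, show ((i : Int) - i).toNat = 0 by omega]
      simp]
    simp only [List.reverse_nil, List.foldl_nil]
    rw [show (0 + 1 : Nat) = 1 from rfl, List.range_one, List.map_cons, List.map_nil]
    rw [show bestA i C (i + ((0 : Nat) : Int)) = 0 by
      rw [bestA, show (i - (i + ((0:Nat):Int))).toNat + 1 = 0 + 1 by omega]
      simp only [consultA]
      rw [if_pos (by omega : i + ((0:Nat):Int) ≥ i)]]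
  | succ m ih =>
    intro i hi hle hm
    have hlt : i < n := by omega
    rw [PySem.List.pyRange_one_cons hlt]
    simp only [List.reverse_cons, List.foldl_append, List.foldl_cons, List.foldl_nil]
    rw [ih (i + 1) (by omega) (by omega) (by omega)]
    have hg := hgood i hi hlt
    have ht1 : 1 ≤ tOf C i := hg.1
    have hgoodt : ∀ j : Int, idx ≤ j → j < n → 1 ≤ tOf C j := fun j a b => (hgood j a b).1
    have hhead : PySem.List.pyGet? ((List.range (m + 1)).map (fun (j : Nat) => bestA n C (i + 1 + (j : Int)))) 0
        = some (bestA n C (i + 1)) := by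
      rw [PySem.List.pyGet?_zero, List.getElem?_map, List.getElem?_range (Nat.succ_pos m)]
      simp
    have hrec : bestA n C i
        = if i + tOf C i ≤ n
          then max (pOf C i + bestA n C (i + tOf C i)) (bestA n C (i + 1))
          else bestA n C (i + 1) := by
      have hmm : (n - i).toNat + 1 = (m + 1) + 1 := by omega
      rw [bestA, hmm, consultA_succ (m + 1) n i 0 C (by omega)]
      by_cases hw : i + tOf C i ≤ n
      · rw [if_pos hw, if_pos hw]
        rw [consultA_shift (m + 1) n (i + tOf C i) (0 + pOf C i) C,
            consultA_stable hgoodt (m + 1) ((n - (i + tOf C i)).toNat + 1)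
              (i + tOf C i) (by omega) (by omega) (by omega),
            consultA_stable hgoodt (m + 1) ((n - (i + 1)).toNat + 1)
              (i + 1) (by omega) (by omega) (by omega)]
        simp only [bestA, zero_add]
      · rw [if_neg hw, if_neg hw,
            consultA_stable hgoodt (m + 1) ((n - (i + 1)).toNat + 1)
              (i + 1) (by omega) (by omega) (by omega)]
        rw [max_eq_right (consultA_nonneg _ n (i + 1) C)]
        simp only [bestA]
    rw [show stepB n C ((List.range (m + 1)).map (fun (j : Nat) => bestA n C (i + 1 + (j : Int)))) i
        = bestA n C i :: (List.range (m + 1)).map (fun (j : Nat) => bestA n C (i + 1 + (j : Int))) by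
      unfold stepB
      by_cases hw : i + tOf C i ≤ n
      · have htidx : (tOf C i - 1).toNat < m + 1 := by omega
        have htv : PySem.List.pyGet?
            ((List.range (m + 1)).map (fun (j : Nat) => bestA n C (i + 1 + (j : Int)))) (tOf C i - 1)
            = some (bestA n C (i + tOf C i)) := by
          rw [PySem.List.pyGet?_of_nonneg _ (by omega : (0:Int) ≤ tOf C i - 1),
              List.getElem?_map, List.getElem?_range htidx]
          simp only [Option.map_some, Option.some.injEq]
          rw [show i + 1 + (((tOf C i - 1).toNat : Nat) : Int) = i + tOf C i by omega]
        simp only [hw, if_true, hhead, htv, Option.getD_some]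
        rw [hrec, if_pos hw, max_comm]
      · simp only [hw, if_false, hhead, Option.getD_some]
        rw [hrec, if_neg hw]]
    conv_rhs => rw [List.range_succ_eq_map, List.map_cons, List.map_map]
    congr 1
    · norm_num
    · apply List.map_congr_left
      intro j _
      simp only [Function.comp_apply]
      congr 1
      push_cast
      ring

-- ===== VERDICT (by name: the statement is the Claim_ definition above) =====
theorem consulting_plan_spec : Claim_equal_consulting_plan := by
  intro n idx total_p C _ hpre
  unfold Spec_consulting_plan
  rcases hpre with h | ⟨h0, hlen, hrows⟩
  · unfold consulting_plan consulting_plan_alt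
    rw [show (n - idx).toNat = 0 by omega]
    simp [consultA, show idx ≥ n from h]
  · by_cases hge : idx ≥ n
    · unfold consulting_plan consulting_plan_alt
      rw [show (n - idx).toNat = 0 by omega]
      simp [consultA, hge]
    · have hgood : ∀ i : Int, idx ≤ i → i < n →
          1 ≤ tOf C i ∧ (i + tOf C i ≤ n → 2 ≤ (rowOf C i).length) :=
        fun i a b => good_of_pre h0 hlen hrows a b
      unfold consulting_plan consulting_plan_alt
      rw [if_neg hge]
      rw [foldB_eq hgood (n - idx).toNat idx (le_refl idx) (by omega) rfl]
      rw [consultA_shift]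
      congr 1
      rw [PySem.List.pyGet?_zero]
      simp [List.getElem?_map, List.getElem?_range, Nat.succ_pos, bestA]
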